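-- pv_equiv track=rewrite | github.com/zhenzhizhi12/GraphDistill | core/entity_id_normalizer.py | _strip_generics
-- ===== SOURCE A (Python) =====
-- from typing import List, Tuple
--
-- def _strip_generics(name: str) -> Tuple[str, bool]:
--     """
--     移除泛型参数，返回 (基础名称, 是否有泛型)。
--
--     示例：
--     - "ArrayDeque<T>" -> ("ArrayDeque", True)
--     - "HashMap<K, V>" -> ("HashMap", True)
--     - "String" -> ("String", False)
--     """
--     if "<" not in name:
--         return name, False
--
--     # 找到第一个 < 和匹配的 >
--     depth = 0
--     start = name.find("<")
--     if start == -1: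
--         return name, False
--
--     for i in range(start, len(name)):
--         if name[i] == "<":
--             depth += 1
--         elif name[i] == ">":
--             depth -= 1
--             if depth == 0:
--                 return name[:start].strip(), True
--
--     # 未闭合的泛型，返回去掉 < 之后的部分
--     return name[:start].strip(), True
-- ===== SOURCE B (Python) =====
-- def _strip_generics(name: str):
--     # Single forward pass over the characters, accumulating the prefix;
--     # no membership test, no find(), no index arithmetic, no depth counter.
--     prefix = []
--     for ch in name:
--         if ch == "<":
--             return "".join(prefix).strip(), True
--         prefix.append(ch)
--     return name, False
-- ===== Notes on version B (the rewrite author's own statement) =====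
-- stated objective: alternative
-- what changed: A locates the generic part via a membership test, str.find and an index-based bracket-depth matching loop, then slices; B makes one forward pass over the characters with a prefix accumulator, returning the stripped accumulated prefix the moment it meets '<' and never indexing, finding or counting depth.
import Mathlib
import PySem

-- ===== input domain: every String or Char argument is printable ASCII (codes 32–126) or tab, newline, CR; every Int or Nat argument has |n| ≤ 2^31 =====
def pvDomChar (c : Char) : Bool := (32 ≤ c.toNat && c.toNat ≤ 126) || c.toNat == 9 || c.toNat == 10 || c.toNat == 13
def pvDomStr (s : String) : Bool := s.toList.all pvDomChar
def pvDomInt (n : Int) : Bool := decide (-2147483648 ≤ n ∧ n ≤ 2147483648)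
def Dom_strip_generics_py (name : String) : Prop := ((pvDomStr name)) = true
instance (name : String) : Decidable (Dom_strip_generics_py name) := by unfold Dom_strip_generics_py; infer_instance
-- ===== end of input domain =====

-- B replaces A's membership-test + find + index-loop-with-depth-counter + slice pipeline with one
-- forward pass over the characters that accumulates the prefix and returns on the first '<' (objective: alternative).

-- ===== PORT A =====
-- the 'for i in range(start, len(name))' loop: 'some v' on the early return, 'none' on fall-through
def stripGenLoop (name : String) (start : Int) : List Int → Int → Option (String × Bool)
  | [], _ => none
  | i :: rest, depth =>
    if PySem.Str.pyGet? name i = some '<' then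
      stripGenLoop name start rest (depth + 1)
    else if PySem.Str.pyGet? name i = some '>' then
      if depth - 1 = 0 then
        some (PySem.Str.strip (PySem.Str.slice name none (some start)), true)
      else
        stripGenLoop name start rest (depth - 1)
    else
      stripGenLoop name start rest depth

def strip_generics_py (name : String) : String × Bool :=
  if PySem.Str.isIn "<" name = false then (name, false)
  else
    let start := PySem.Str.find name "<"
    if start = -1 then (name, false)
    else
      match stripGenLoop name start (PySem.List.pyRange start (PySem.Str.len name) 1) 0 with
      | some v => v
      | none => (PySem.Str.strip (PySem.Str.slice name none (some start)), true)

-- ===== PORT B =====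
-- the 'for ch in name' loop with the 'prefix' accumulator; '"".join(prefix)' is String.ofList
def stripAccLoop (name : String) : List Char → List Char → String × Bool
  | _acc, [] => (name, false)
  | acc, c :: rest =>
    if c = '<' then (PySem.Str.strip (String.ofList acc), true)
    else stripAccLoop name (acc ++ [c]) rest

def strip_generics_py_alt (name : String) : String × Bool :=
  stripAccLoop name [] name.toList

-- ===== PRECONDITION & SPEC =====
def Spec_strip_generics_py (name : String) (out : String × Bool) : Prop := out = strip_generics_py_alt name
instance (name : String) (out : String × Bool) : Decidable (Spec_strip_generics_py name out) := by unfold Spec_strip_generics_py; infer_instance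

-- ===== CLAIM (what is proved, stated in full; the proofs are below) =====
def Claim_equal_strip_generics_py : Prop := ∀ (name : String), Dom_strip_generics_py name → Spec_strip_generics_py name (strip_generics_py name)

-- ===== LEMMAS AND PROOFS =====

-- Either exit of A's matching loop yields the same value: the stripped prefix before 'start'.
theorem stripGenLoop_eq (name : String) (start : Int) (idxs : List Int) (depth : Int) :
    (match stripGenLoop name start idxs depth with
     | some v => v
     | none => (PySem.Str.strip (PySem.Str.slice name none (some start)), true))
    = (PySem.Str.strip (PySem.Str.slice name none (some start)), true) := by
  induction idxs generalizing depth with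
  | nil => rfl
  | cons i rest ih =>
    simp only [stripGenLoop]
    split_ifs with h1 h2 h3
    · exact ih _
    · rfl
    · exact ih _
    · exact ih _

-- B's loop on a '<'-free suffix falls through to (name, false)
theorem stripAccLoop_no_lt (name : String) (cs acc : List Char) (h : '<' ∉ cs) :
    stripAccLoop name acc cs = (name, false) := by
  induction cs generalizing acc with
  | nil => rfl
  | cons c rest ih =>
    have hc : ¬ c = '<' := fun hc => h (hc ▸ List.mem_cons_self)
    simp only [stripAccLoop, if_neg hc]
    exact ih _ (fun hm => h (List.mem_cons_of_mem _ hm))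

-- B's loop on a suffix containing '<' returns the stripped accumulated prefix
theorem stripAccLoop_lt (name : String) (cs : List Char) (h : '<' ∈ cs) : ∀ acc,
    stripAccLoop name acc cs
      = (PySem.Str.strip (String.ofList (acc ++ cs.takeWhile (· ≠ '<'))), true) := by
  induction cs with
  | nil => cases h
  | cons c rest ih =>
    intro acc
    by_cases hc : c = '<'
    · subst hc
      simp [stripAccLoop]
    · have hm : '<' ∈ rest := by
        rcases List.mem_cons.mp h with h0 | h0
        · exact absurd h0.symm hc
        · exact h0
      simp [stripAccLoop, hc, ih hm]

-- a singleton pattern is a prefix of a drop iff that position holds the character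
theorem singleton_prefix_drop (cs : List Char) (a : Char) (j : Nat) :
    [a] <+: cs.drop j ↔ cs[j]? = some a := by
  rw [List.cons_prefix_iff]
  constructor
  · rintro ⟨l', hl, -⟩
    have := congrArg List.head? hl
    simpa [List.head?_drop] using this
  · intro hj
    have hh : (cs.drop j).head? = some a := by simpa [List.head?_drop] using hj
    cases hd : cs.drop j with
    | nil => simp [hd] at hh
    | cons x t =>
      refine ⟨t, ?_, List.nil_prefix⟩
      simp [hd] at hh
      simp [hh]

-- first occurrence characterises take-as-takeWhile
theorem take_eq_takeWhile (cs : List Char) (k : Nat)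
    (hk : cs[k]? = some '<') (hlt : ∀ i, i < k → cs[i]? ≠ some '<') :
    cs.take k = cs.takeWhile (· ≠ '<') := by
  induction cs generalizing k with
  | nil => simp at hk
  | cons c rest ih =>
    cases k with
    | zero =>
      simp at hk
      simp [hk]
    | succ k =>
      have hc : ¬ c = '<' := by
        intro hc
        exact hlt 0 (Nat.succ_pos _) (by simp [hc])
      simp only [List.take_succ_cons, List.takeWhile_cons]
      rw [if_pos (by simpa using hc)]
      congr 1
      exact ih k (by simpa using hk) (fun i hi => by
        have := hlt (i+1) (Nat.succ_lt_succ hi)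
        simpa using this)

-- when '<' occurs, A's slice-to-find equals the '<'-free prefix
theorem slice_find_eq_takeWhile (cs : List Char) (h : '<' ∈ cs) :
    PySem.Chars.slice cs none (some (PySem.Chars.find cs ['<']))
      = cs.takeWhile (· ≠ '<') := by
  have hinf : ['<'] <:+: cs := by
    obtain ⟨s, t, rfl⟩ := List.append_of_mem h
    exact ⟨s, t, by simp⟩
  have hnn : 0 ≤ PySem.Chars.find cs ['<'] := (PySem.Chars.find_nonneg_iff _ _).mpr hinf
  obtain ⟨hpre, hmin⟩ := PySem.Chars.find_spec hnn
  rw [PySem.Chars.slice_eq_listSlice, PySem.List.slice_to _ hnn]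
  exact take_eq_takeWhile cs _ ((singleton_prefix_drop cs '<' _).mp hpre)
    (fun i hi hget => hmin i hi ((singleton_prefix_drop cs '<' i).mpr hget))

-- ===== VERDICT (by name: the statement is the Claim_ definition above) =====
theorem strip_generics_py_spec : Claim_equal_strip_generics_py := by
  intro name _
  unfold Spec_strip_generics_py strip_generics_py strip_generics_py_alt
  by_cases h : PySem.Str.isIn "<" name = false
  · rw [if_pos h]
    have hnm : '<' ∉ name.toList := by
      intro hm
      have : ("<" : String).toList <:+: name.toList := by
        obtain ⟨s, t, hst⟩ := List.append_of_mem hm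
        exact ⟨s, t, by rw [hst]; simp⟩
      rw [← PySem.Str.isIn_iff_infix] at this
      rw [h] at this
      exact Bool.false_ne_true this
    rw [stripAccLoop_no_lt name _ _ hnm]
  · have ht : PySem.Str.isIn "<" name = true := by
      cases hb : PySem.Str.isIn "<" name
      · exact absurd hb h
      · rfl
    have hinf := (PySem.Str.isIn_iff_infix _ _).mp ht
    have hmem : '<' ∈ name.toList := hinf.sublist.mem (by simp)
    have hfind : PySem.Str.find name "<" ≠ -1 := by
      rw [PySem.Str.find_ne_neg_one_iff]
      exact hinf
    rw [if_neg h, if_neg hfind]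
    rw [stripGenLoop_eq name _ _ 0, stripAccLoop_lt name _ hmem []]
    have htl : (PySem.Str.slice name none (some (PySem.Str.find name "<"))).toList
        = (String.ofList ([] ++ name.toList.takeWhile (· ≠ '<'))).toList := by
      rw [PySem.Str.toList_slice]
      have hfe : PySem.Str.find name "<" = PySem.Chars.find name.toList ['<'] := by
        simp [PySem.Str.find_eq]
      rw [hfe, slice_find_eq_takeWhile _ hmem]
      simp
    simp only [PySem.Str.strip]
    rw [htl]
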